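-- pv_equiv track=rewrite | github.com/dmitry-s-danilov/geekbrains_python_basics | lesson_4/task/problem_4.py | filter_0_duplicate
-- ===== SOURCE A (Python) =====
-- def filter_0_duplicate(x):
--     y = []
--     for i in range(len(x)):
--         u = True
--         for j in range(i):
--             if x[i] == x[j]:
--                 u = False
--                 break
--         if u:
--             for j in range(i + 1, len(x)):
--                 if x[i] == x[j]:
--                     u = False
--                     break
--             if not u:
--                 y.append(x[i])
--     return y
-- ===== SOURCE B (Python) =====
-- def filter_0_duplicate(x):
--     counts = {}
--     for v in x:
--         counts[v] = counts.get(v, 0) + 1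
--     return [v for v, c in counts.items() if c > 1]
-- ===== Notes on version B (the rewrite author's own statement) =====
-- stated objective: faster
-- what changed: Replaces A's O(n^2) per-index backward/forward scans with one pass building an insertion-ordered count dictionary, then filters its items for count > 1.
import Mathlib
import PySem

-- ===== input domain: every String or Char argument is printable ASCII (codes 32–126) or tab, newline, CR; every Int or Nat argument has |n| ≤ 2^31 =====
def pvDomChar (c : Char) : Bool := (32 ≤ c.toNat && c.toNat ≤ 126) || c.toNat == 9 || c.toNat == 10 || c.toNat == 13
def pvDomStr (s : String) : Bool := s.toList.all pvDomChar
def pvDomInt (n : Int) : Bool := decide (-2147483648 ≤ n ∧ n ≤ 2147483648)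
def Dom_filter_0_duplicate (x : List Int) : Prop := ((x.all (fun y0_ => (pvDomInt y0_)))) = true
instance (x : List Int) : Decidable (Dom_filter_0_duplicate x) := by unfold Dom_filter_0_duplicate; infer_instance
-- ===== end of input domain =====

-- B replaces A's quadratic per-index backward/forward scans by one counting-dict pass plus an items filter (asymptotically faster).


-- ===== PORT A =====
def filter_0_duplicate (x : List Int) : List Int :=
  (PySem.List.pyRange 0 (x.length : Int) 1).foldl (fun y i =>
    -- u after the first inner loop (scan of x[0:i] with break)
    if (PySem.List.pyRange 0 i 1).any (fun j => PySem.List.pyGetD x i 0 == PySem.List.pyGetD x j 0) then y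
    -- second inner loop (scan of x[i+1:] with break); append when a later duplicate exists
    else if (PySem.List.pyRange (i + 1) (x.length : Int) 1).any
        (fun j => PySem.List.pyGetD x i 0 == PySem.List.pyGetD x j 0) then
      y ++ [PySem.List.pyGetD x i 0]
    else y) []

-- ===== PORT B =====
def filter_0_duplicate_alt (x : List Int) : List Int :=
  let counts := x.foldl (fun d v => d.insert v (d.getD v 0 + 1)) (PySem.Dict.empty : PySem.Dict Int Int)
  (counts.items.filter (fun p => decide (1 < p.2))).map (fun p => p.1)

-- ===== PRECONDITION & SPEC =====
def Spec_filter_0_duplicate (x : List Int) (out : List Int) : Prop := out = filter_0_duplicate_alt x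
instance (x : List Int) (out : List Int) : Decidable (Spec_filter_0_duplicate x out) := by unfold Spec_filter_0_duplicate; infer_instance

-- ===== CLAIM (what is proved, stated in full; the proofs are below) =====
def Claim_equal_filter_0_duplicate : Prop := ∀ (x : List Int), Dom_filter_0_duplicate x → Spec_filter_0_duplicate x (filter_0_duplicate x)

-- ===== LEMMAS AND PROOFS =====

-- common closed form: first occurrences (PySem.List.dedup), kept iff multiplicity > 1
def pvSpecList (x : List Int) : List Int :=
  (PySem.List.dedup x).filter (fun v => decide (1 < x.count v))

-- A's result, index-free: indices i whose value has no earlier and some later equal occurrence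
def pvIdx (x : List Int) : List Int :=
  ((List.range x.length).filter (fun i =>
      !((x.take i).any (fun w => x.getD i 0 == w)) &&
        ((x.drop (i + 1)).any (fun w => x.getD i 0 == w)))).map (fun i => x.getD i 0)

theorem ofList_acc (t : List Int) : ∀ (acc : List Int),
    List.foldl PySem.Set.add acc t
      = acc ++ (PySem.Set.ofList t).filter (fun w => !acc.contains w) := by
  induction t with
  | nil => intro acc; simp [PySem.Set.ofList, PySem.Set.empty]
  | cons v t ih =>
    intro acc
    have hv : PySem.Set.ofList (v :: t)
        = [v] ++ (PySem.Set.ofList t).filter (fun w => !([v] : List Int).contains w) := by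
      show List.foldl PySem.Set.add (PySem.Set.add PySem.Set.empty v) t = _
      exact ih [v]
    show List.foldl PySem.Set.add (PySem.Set.add acc v) t = _
    rw [ih (PySem.Set.add acc v), hv]
    by_cases h : v ∈ acc
    · rw [show PySem.Set.add acc v = acc from by
        simp [PySem.Set.add, List.contains_eq_mem, h]]
      rw [List.filter_append]
      have h1 : ([v] : List Int).filter (fun w => !acc.contains w) = [] := by
        simp [List.contains_eq_mem, h]
      rw [h1, List.nil_append, List.filter_filter]
      congr 1
      apply List.filter_congr
      intro w _
      by_cases hw : w = v
      · subst hw; simp [List.contains_eq_mem, h]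
      · simp [List.contains_eq_mem, hw]
    · rw [show PySem.Set.add acc v = acc ++ [v] from by
        simp [PySem.Set.add, List.contains_eq_mem, h]]
      rw [List.append_assoc]
      congr 1
      rw [List.filter_append]
      have h1 : ([v] : List Int).filter (fun w => !acc.contains w) = [v] := by
        simp [List.contains_eq_mem, h]
      rw [h1, List.filter_filter]
      congr 1
      apply List.filter_congr
      intro w _
      by_cases hw : w = v
      · subst hw; simp [List.contains_eq_mem, h]
      · simp [List.contains_eq_mem, hw, List.mem_append]

theorem dedup_cons (a : Int) (t : List Int) :
    PySem.List.dedup (a :: t) = a :: (PySem.List.dedup t).filter (fun w => !(w == a)) := by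
  rw [PySem.List.dedup_eq_ofList, PySem.List.dedup_eq_ofList]
  show List.foldl PySem.Set.add (PySem.Set.add PySem.Set.empty a) t = _
  rw [show PySem.Set.add PySem.Set.empty a = [a] from rfl, ofList_acc]
  simp only [List.singleton_append, List.cons.injEq, true_and]
  apply List.filter_congr
  intro w _
  by_cases hw : w = a <;> simp [List.contains_eq_mem, hw]

theorem any_range_getD (v : Int) (l : List Int) :
    (List.range l.length).any (fun k => v == l.getD k 0) = l.any (fun w => v == w) := by
  induction l with
  | nil => simp
  | cons a t ih =>
    rw [List.length_cons, List.range_succ_eq_map]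
    simp only [List.any_cons, List.any_map, Function.comp_def, Nat.succ_eq_add_one,
      List.getD_cons_succ, List.getD_cons_zero]
    rw [ih]

theorem any_range_getD_drop (v : Int) (x : List Int) (a : Nat) :
    (List.range (x.length - a)).any (fun k => v == x.getD (a + k) 0)
      = (x.drop a).any (fun w => v == w) := by
  have hf : (fun k => v == x.getD (a + k) 0) = (fun k => v == (x.drop a).getD k 0) := by
    funext k
    rw [List.getD_eq_getElem?_getD, List.getD_eq_getElem?_getD, List.getElem?_drop]
  rw [hf, show x.length - a = (x.drop a).length from (List.length_drop).symm,
    any_range_getD]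

theorem any_range_getD_take (v : Int) (x : List Int) : ∀ (i : Nat), i ≤ x.length →
    (List.range i).any (fun k => v == x.getD k 0) = (x.take i).any (fun w => v == w) := by
  intro i
  induction i with
  | zero => intro _; simp
  | succ i ih =>
    intro h
    rw [List.range_succ, List.any_append, ih (by omega), List.take_add_one, List.any_append]
    congr 1
    have hi : i < x.length := by omega
    simp [List.getElem?_eq_getElem hi, List.getD_eq_getElem?_getD]

theorem filter_map_comm (l : List Nat) (g : Nat → Int) (q : Nat → Bool) (a : Int) :
    (l.filter (fun i => !(g i == a) && q i)).map g
      = ((l.filter q).map g).filter (fun w => !(w == a)) := by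
  rw [List.filter_map, List.filter_filter]
  refine congrArg (List.map g) (List.filter_congr fun i _ => ?_)
  simp

-- step 1: A's foldl over index ranges is the index-free filter/map pvIdx
theorem a_eq_idx (x : List Int) : filter_0_duplicate x = pvIdx x := by
  unfold filter_0_duplicate pvIdx
  rw [show (fun (y : List Int) (i : Int) =>
      if (PySem.List.pyRange 0 i 1).any (fun j => PySem.List.pyGetD x i 0 == PySem.List.pyGetD x j 0) then y
      else if (PySem.List.pyRange (i + 1) (x.length : Int) 1).any
          (fun j => PySem.List.pyGetD x i 0 == PySem.List.pyGetD x j 0) then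
        y ++ [PySem.List.pyGetD x i 0]
      else y)
    = (fun (y : List Int) (i : Int) =>
      if (!((PySem.List.pyRange 0 i 1).any (fun j => PySem.List.pyGetD x i 0 == PySem.List.pyGetD x j 0)) &&
          (PySem.List.pyRange (i + 1) (x.length : Int) 1).any
            (fun j => PySem.List.pyGetD x i 0 == PySem.List.pyGetD x j 0)) = true then
        y ++ [PySem.List.pyGetD x i 0] else y) from by
      funext y i
      by_cases h1 : (PySem.List.pyRange 0 i 1).any (fun j => PySem.List.pyGetD x i 0 == PySem.List.pyGetD x j 0) <;>
        by_cases h2 : (PySem.List.pyRange (i + 1) (x.length : Int) 1).any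
            (fun j => PySem.List.pyGetD x i 0 == PySem.List.pyGetD x j 0) <;>
        simp [h1, h2]]
  rw [PySem.List.foldl_append_if, List.nil_append, PySem.List.pyRange_one]
  simp only [Int.sub_zero, Int.toNat_natCast]
  rw [List.filter_map, List.map_map]
  have hpred : ∀ i ∈ List.range x.length,
      ((fun i => !((PySem.List.pyRange 0 i 1).any fun j => PySem.List.pyGetD x i 0 == PySem.List.pyGetD x j 0) &&
          ((PySem.List.pyRange (i + 1) (x.length : Int) 1).any
            fun j => PySem.List.pyGetD x i 0 == PySem.List.pyGetD x j 0)) ∘ (fun k : Nat => (0 : Int) + k)) i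
      = (!((x.take i).any fun w => x.getD i 0 == w) && ((x.drop (i + 1)).any fun w => x.getD i 0 == w)) := by
    intro i hi
    rw [List.mem_range] at hi
    simp only [Function.comp_def, zero_add, PySem.List.pyGetD_natCast]
    congr 1
    · -- backward scan = scan of take i
      rw [PySem.List.pyRange_one]
      simp only [Int.sub_zero, Int.toNat_natCast, List.any_map, Function.comp_def,
        zero_add, PySem.List.pyGetD_natCast]
      rw [any_range_getD_take _ _ _ (Nat.le_of_lt hi)]
    · -- forward scan = scan of drop (i+1)
      rw [PySem.List.pyRange_one]
      have hc : (((x.length : Int)) - ((i : Int) + 1)).toNat = x.length - (i + 1) := by omega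
      rw [hc]
      simp only [List.any_map, Function.comp_def]
      have hidx : ∀ k : Nat, ((i : Int) + 1 + (k : Int)) = ((i + 1 + k : Nat) : Int) := by
        intro k; push_cast; ring
      simp only [hidx, PySem.List.pyGetD_natCast]
      rw [any_range_getD_drop]
  rw [List.filter_congr hpred]
  apply List.map_congr_left
  intro i hi
  have hi' : i < x.length := List.mem_range.mp (List.mem_of_mem_filter hi)
  simp [PySem.List.pyGetD_natCast]

-- step 2: pvIdx satisfies the same cons recursion as pvSpecList
theorem idx_eq_spec (x : List Int) : pvIdx x = pvSpecList x := by
  induction x with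
  | nil => rfl
  | cons a t ih =>
    have hL : pvIdx (a :: t)
        = (if t.any (fun w => a == w) then [a] else [])
            ++ (pvIdx t).filter (fun w => !(w == a)) := by
      unfold pvIdx
      rw [List.length_cons, List.range_succ_eq_map, List.filter_cons]
      have h0 : (!(((a :: t).take 0).any fun w => (a :: t).getD 0 0 == w) &&
          (((a :: t).drop (0 + 1)).any fun w => (a :: t).getD 0 0 == w))
          = t.any (fun w => a == w) := by simp
      rw [h0, List.filter_map]
      have hsucc : ∀ j ∈ List.range t.length,
          ((fun i => !(((a :: t).take i).any fun w => (a :: t).getD i 0 == w) &&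
              (((a :: t).drop (i + 1)).any fun w => (a :: t).getD i 0 == w)) ∘ Nat.succ) j
          = (!(t.getD j 0 == a) &&
              (!((t.take j).any fun w => t.getD j 0 == w) &&
                ((t.drop (j + 1)).any fun w => t.getD j 0 == w))) := by
        intro j _
        simp only [Function.comp_def, Nat.succ_eq_add_one, List.getD_cons_succ,
          List.take_succ_cons, List.drop_succ_cons, List.any_cons, Bool.not_or,
          Bool.and_assoc]
      rw [List.filter_congr hsucc]
      have hmapsucc : ((fun i => (a :: t).getD i 0) ∘ Nat.succ) = (fun j => t.getD j 0) := by
        funext j; simp [Nat.succ_eq_add_one]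
      have hfm :
          (List.filter (fun j => !(t.getD j 0 == a) &&
              (!((t.take j).any fun w => t.getD j 0 == w) &&
                ((t.drop (j + 1)).any fun w => t.getD j 0 == w)))
            (List.range t.length)).map (fun j => t.getD j 0)
          = ((List.filter (fun j =>
                (!((t.take j).any fun w => t.getD j 0 == w) &&
                  ((t.drop (j + 1)).any fun w => t.getD j 0 == w)))
              (List.range t.length)).map (fun j => t.getD j 0)).filter (fun w => !(w == a)) :=
        filter_map_comm (List.range t.length) (fun j => t.getD j 0)
          (fun j => (!((t.take j).any fun w => t.getD j 0 == w) &&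
            ((t.drop (j + 1)).any fun w => t.getD j 0 == w))) a
      by_cases hc : (t.any (fun w => a == w)) = true
      · rw [if_pos hc, if_pos hc, List.map_cons, List.map_map, hmapsucc, hfm]
        rfl
      · rw [if_neg hc, if_neg hc, List.map_map, hmapsucc, hfm]
        rfl
    have hR : pvSpecList (a :: t)
        = (if t.any (fun w => a == w) then [a] else [])
            ++ (pvSpecList t).filter (fun w => !(w == a)) := by
      unfold pvSpecList
      rw [dedup_cons, List.filter_cons]
      have hcnt : decide (1 < List.count a (a :: t)) = t.any (fun w => a == w) := by
        rw [List.count_cons_self, List.any_beq, List.contains_eq_mem, decide_eq_decide]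
        rw [show (1 < List.count a t + 1) ↔ (0 < List.count a t) from by omega]
        exact List.count_pos_iff
      have htail :
          List.filter (fun v => decide (1 < List.count v (a :: t)))
              (List.filter (fun w => !(w == a)) (PySem.List.dedup t))
            = List.filter (fun w => !(w == a))
                (List.filter (fun v => decide (1 < List.count v t)) (PySem.List.dedup t)) := by
        rw [List.filter_filter, List.filter_filter]
        apply List.filter_congr
        intro w _
        by_cases hw : w = a
        · subst hw; simp
        · rw [List.count_cons_of_ne (Ne.symm hw)]
          simp [Bool.and_comm]
      rw [hcnt, htail]
      by_cases hc : (t.any (fun w => a == w)) = true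
      · rw [if_pos hc, if_pos hc]
        rfl
      · rw [if_neg hc, if_neg hc]
        rfl
    rw [hL, hR, ih]
  
theorem b_eq_spec (x : List Int) : filter_0_duplicate_alt x = pvSpecList x := by
  show ((x.foldl (fun d v => d.insert v (d.getD v 0 + 1)) (PySem.Dict.empty : PySem.Dict Int Int)).items.filter
      (fun p => decide (1 < p.2))).map (fun p => p.1) = _
  rw [PySem.Dict.foldl_insert_getD_add_one_eq_counter x, PySem.Dict.items_counter,
    List.filter_map, List.map_map]
  unfold pvSpecList
  rw [PySem.List.dedup_eq_ofList]
  have h : ((fun (p : Int × Int) => decide (1 < p.2)) ∘ fun k => (k, (List.count k x : Int)))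
      = fun v => decide (1 < x.count v) := by
    funext k
    simp [Nat.one_lt_cast]
  rw [h]
  simp [Function.comp_def]

-- ===== VERDICT (by name: the statement is the Claim_ definition above) =====
theorem filter_0_duplicate_spec : Claim_equal_filter_0_duplicate := by
  intro x _
  show filter_0_duplicate x = filter_0_duplicate_alt x
  rw [a_eq_idx, idx_eq_spec, b_eq_spec]
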